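-- pv_equiv track=rewrite | github.com/Bhuvan701/hr-deploy | resume/create_resume/report.py | bstr
-- ===== SOURCE A (Python) =====
-- def bstr(st,start):
--     f=""
--     s=""
--     start = 30
--     t = st.split(' ')
--     for i in range(len(t)):
--         if(len(t[i])<start):
--             f+=t[i]
--             f+=" "
--         else:
--             s+=t[i]
--             s+=' '
--         start = start-len(t[i])
--     return f,s
-- ===== SOURCE B (Python) =====
-- def bstr(st, start):
--     words = st.split(' ')
--     total = 0
--     sums = []
--     for w in words:
--         total += len(w)
--         sums.append(total)
--     f = ''.join(w + ' ' for w, c in zip(words, sums) if c < 30)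
--     s = ''.join(w + ' ' for w, c in zip(words, sums) if not c < 30)
--     return f, s
-- ===== Notes on version B (the rewrite author's own statement) =====
-- stated objective: alternative
-- what changed: Replaces the decreasing in-loop counter and in-place string accumulation with an explicit prefix-sum table of word lengths followed by two join-based partition passes over zip(words, sums).
import Mathlib
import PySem

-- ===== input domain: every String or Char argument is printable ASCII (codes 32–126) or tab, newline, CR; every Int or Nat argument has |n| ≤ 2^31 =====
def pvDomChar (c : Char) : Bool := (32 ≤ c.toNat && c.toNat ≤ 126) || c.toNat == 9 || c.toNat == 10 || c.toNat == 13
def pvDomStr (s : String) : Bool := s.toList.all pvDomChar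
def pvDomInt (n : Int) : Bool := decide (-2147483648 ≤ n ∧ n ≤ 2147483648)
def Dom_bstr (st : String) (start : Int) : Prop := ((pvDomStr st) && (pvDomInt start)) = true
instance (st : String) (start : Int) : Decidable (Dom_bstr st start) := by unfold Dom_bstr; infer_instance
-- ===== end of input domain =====

-- B replaces A's decreasing counter with a prefix-sum table and two join-based partition passes; same cost, different decomposition.

-- ===== PORT A =====
-- one iteration of A's for-loop body: state (f, s, start)
def bstrStep (acc : List Char × List Char × Int) (w : List Char) : List Char × List Char × Int :=
  if ((w.length : Int)) < acc.2.2 then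
    (acc.1 ++ w ++ [' '], acc.2.1, acc.2.2 - (w.length : Int))
  else
    (acc.1, acc.2.1 ++ w ++ [' '], acc.2.2 - (w.length : Int))

def bstr (st : String) (start : Int) : String × String :=
  let t := PySem.Chars.splitOn st.toList [' ']
  let r := t.foldl bstrStep (([] : List Char), ([] : List Char), (30 : Int))
  (String.ofList r.1, String.ofList r.2.1)

-- ===== PORT B =====
-- one iteration of B's prefix-sum loop: state (total, sums)
def bstrSumStep (p : Int × List Int) (w : List Char) : Int × List Int :=
  (p.1 + (w.length : Int), p.2 ++ [p.1 + (w.length : Int)])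

def bstr_alt (st : String) (start : Int) : String × String :=
  let words := PySem.Chars.splitOn st.toList [' ']
  let sums := (words.foldl bstrSumStep ((0 : Int), ([] : List Int))).2
  let pairs := words.zip sums
  -- ''.join(w + ' ' for …) ported as flatten of the mapped parts
  let f := String.ofList (((pairs.filter (fun p => p.2 < 30)).map (fun p => p.1 ++ [' '])).flatten)
  let s := String.ofList (((pairs.filter (fun p => !(p.2 < 30))).map (fun p => p.1 ++ [' '])).flatten)
  (f, s)

-- ===== PRECONDITION & SPEC =====
def Spec_bstr (st : String) (start : Int) (out : String × String) : Prop := out = bstr_alt st start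
instance (st : String) (start : Int) (out : String × String) : Decidable (Spec_bstr st start out) := by unfold Spec_bstr; infer_instance

-- ===== CLAIM (what is proved, stated in full; the proofs are below) =====
def Claim_equal_bstr : Prop := ∀ (st : String) (start : Int), Dom_bstr st start → Spec_bstr st start (bstr st start)

-- ===== LEMMAS AND PROOFS =====
-- words paired with their inclusive cumulative lengths, starting from already-consumed total c
def bstrCum : List (List Char) → Int → List (List Char × Int)
  | [], _ => []
  | w :: ws, c => (w, c + (w.length : Int)) :: bstrCum ws (c + (w.length : Int))

lemma bstr_sums_eq (ws : List (List Char)) (c : Int) (acc : List Int) :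
    (ws.foldl bstrSumStep (c, acc)).2 = acc ++ (bstrCum ws c).map (·.2) := by
  induction ws generalizing c acc with
  | nil => simp [bstrCum]
  | cons w ws ih => simp [bstrSumStep, bstrCum, ih]

lemma bstr_zip_cum (ws : List (List Char)) (c : Int) :
    ws.zip ((bstrCum ws c).map (·.2)) = bstrCum ws c := by
  induction ws generalizing c with
  | nil => simp [bstrCum]
  | cons w ws ih => simp [bstrCum, ih]

lemma bstr_fold_fs (ws : List (List Char)) (f s : List Char) (c : Int) :
    ((ws.foldl bstrStep (f, s, 30 - c)).1, (ws.foldl bstrStep (f, s, 30 - c)).2.1) =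
      (f ++ (((bstrCum ws c).filter (fun p => p.2 < 30)).map (fun p => p.1 ++ [' '])).flatten,
       s ++ (((bstrCum ws c).filter (fun p => !(p.2 < 30))).map (fun p => p.1 ++ [' '])).flatten) := by
  induction ws generalizing f s c with
  | nil => simp [bstrCum]
  | cons w ws ih =>
    have harith : (30 : Int) - c - (w.length : Int) = 30 - (c + (w.length : Int)) := by ring
    simp only [List.foldl_cons, bstrStep]
    by_cases h : c + (w.length : Int) < 30
    · rw [if_pos (show ((w.length : Int)) < 30 - c by omega), harith, ih]
      simp [bstrCum, h, List.append_assoc]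
    · rw [if_neg (show ¬ ((w.length : Int)) < 30 - c by omega), harith, ih]
      simp [bstrCum, h, List.append_assoc]

lemma bstr_fold_fs0 (ws : List (List Char)) :
    ((ws.foldl bstrStep ([], [], 30)).1, (ws.foldl bstrStep ([], [], 30)).2.1) =
      ((((bstrCum ws 0).filter (fun p => p.2 < 30)).map (fun p => p.1 ++ [' '])).flatten,
       (((bstrCum ws 0).filter (fun p => !(p.2 < 30))).map (fun p => p.1 ++ [' '])).flatten) := by
  have h := bstr_fold_fs ws [] [] 0
  simpa using h

-- ===== VERDICT (by name: the statement is the Claim_ definition above) =====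
theorem bstr_spec : Claim_equal_bstr := by
  intro st start _
  show bstr st start = bstr_alt st start
  have h := bstr_fold_fs0 (PySem.Chars.splitOn st.toList [' '])
  have h1 := congrArg Prod.fst h
  have h2 := congrArg Prod.snd h
  simp only [] at h1 h2
  simp only [bstr, bstr_alt, bstr_sums_eq, bstr_zip_cum, List.nil_append]
  rw [h1, h2]
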